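-- pv_equiv track=rewrite | github.com/Keerthana-G-M/Deck-Genie | ppt_generator.py | get_comparison_key
-- ===== SOURCE A (Python) =====
-- def get_comparison_key(text):
--     """Create a standardized key for text comparison."""
--     if not text:
--         return ""
--
--     # Convert to lowercase and remove punctuation
--     key = ''.join(c.lower() for c in text if c.isalnum() or c.isspace())
--
--     # Remove common words that shouldn't affect uniqueness
--     stop_words = {'the', 'a', 'an', 'and', 'or', 'but', 'in', 'on', 'at', 'to', 'for', 'with', 'by'}
--     words = key.split()
--     key_words = [w for w in words if w not in stop_words]
--
--     return ' '.join(key_words)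
-- ===== SOURCE B (Python) =====
-- def get_comparison_key(text):
--     """Create a standardized key for text comparison (single-pass tokenizer)."""
--     if not text:
--         return ""
--     stop_words = {'the', 'a', 'an', 'and', 'or', 'but', 'in', 'on', 'at', 'to', 'for', 'with', 'by'}
--     out = []
--     buf = []
--     for c in text:
--         if c.isalnum():
--             buf.append(c.lower())
--         elif c.isspace():
--             if buf:
--                 w = ''.join(buf)
--                 if w not in stop_words:
--                     out.append(w)
--             buf = []
--         # any other char (punctuation) is simply dropped, buffer stays open
--     if buf:
--         w = ''.join(buf)
--         if w not in stop_words: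
--             out.append(w)
--     return ' '.join(out)
-- ===== Notes on version B (the rewrite author's own statement) =====
-- stated objective: alternative
-- what changed: Replaces A's four-stage pipeline (filter+lower every char into a new string, str.split(), list-comprehension stop-word filter, join) with a single fused pass over the text that maintains a word buffer and emits non-stop-word tokens as it goes.
import Mathlib
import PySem

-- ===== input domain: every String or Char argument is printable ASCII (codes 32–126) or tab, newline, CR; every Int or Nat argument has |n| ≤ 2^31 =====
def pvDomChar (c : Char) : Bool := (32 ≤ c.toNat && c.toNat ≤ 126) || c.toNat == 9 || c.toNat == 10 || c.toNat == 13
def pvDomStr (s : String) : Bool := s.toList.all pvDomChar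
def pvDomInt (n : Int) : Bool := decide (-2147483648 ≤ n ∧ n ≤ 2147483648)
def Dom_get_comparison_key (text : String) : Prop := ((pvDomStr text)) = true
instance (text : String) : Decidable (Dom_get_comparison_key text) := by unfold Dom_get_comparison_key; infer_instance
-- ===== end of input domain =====

-- B is a single fused pass (one tokenizing loop with a word buffer) instead of A's
-- filter/lower-then-split-then-filter pipeline; same result, objective: alternative decomposition.

-- the stop-word set literal shared by both Pythons
def pvStop : PySem.Set (List Char) :=
  PySem.Set.ofList [['t','h','e'], ['a'], ['a','n'], ['a','n','d'], ['o','r'], ['b','u','t'],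
    ['i','n'], ['o','n'], ['a','t'], ['t','o'], ['f','o','r'], ['w','i','t','h'], ['b','y']]

-- ===== PORT A =====
def get_comparison_key (text : String) : String :=
  if text = "" then "" else
  let key : List Char :=
    (text.toList.filter (fun c => PySem.Chars.isalnum c || PySem.Chars.isspace c)).map PySem.Chars.lowerChar
  let words := PySem.Chars.split₀ key
  let key_words := words.filter (fun w => !(PySem.Set.contains pvStop w))
  String.mk (PySem.Chars.join [' '] key_words)

-- ===== PORT B =====
-- flush the (reversed) buffer: emit it as a word unless empty or a stop word
def altFlush (buf : List Char) (out : List (List Char)) : List (List Char) :=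
  if buf.isEmpty then out
  else if PySem.Set.contains pvStop buf.reverse then out
  else out ++ [buf.reverse]

-- the single pass: alnum chars extend the buffer (lowered), whitespace flushes, others are dropped
def altGo : List Char → List Char → List (List Char) → List (List Char)
  | [], buf, out => altFlush buf out
  | c :: rest, buf, out =>
    if PySem.Chars.isalnum c then altGo rest (PySem.Chars.lowerChar c :: buf) out
    else if PySem.Chars.isspace c then altGo rest [] (altFlush buf out)
    else altGo rest buf out

def get_comparison_key_alt (text : String) : String :=
  if text = "" then "" else
  String.mk (PySem.Chars.join [' '] (altGo text.toList [] []))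

-- ===== PRECONDITION & SPEC =====
def Spec_get_comparison_key (text : String) (out : String) : Prop := out = get_comparison_key_alt text
instance (text : String) (out : String) : Decidable (Spec_get_comparison_key text out) := by unfold Spec_get_comparison_key; infer_instance

-- ===== CLAIM (what is proved, stated in full; the proofs are below) =====
def Claim_equal_get_comparison_key : Prop := ∀ (text : String), Dom_get_comparison_key text → Spec_get_comparison_key text (get_comparison_key text)

-- ===== LEMMAS AND PROOFS =====

theorem char_le_iff (a c : Char) : (a ≤ c) ↔ a.toNat ≤ c.toNat := by
  rw [Char.le_def, UInt32.le_iff_toNat_le]; rfl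

theorem lower_of_space (c : Char) (h : PySem.Chars.isspace c = true) : PySem.Chars.lowerChar c = c := by
  unfold PySem.Chars.lowerChar PySem.Chars.isupper
  simp only [PySem.Chars.isspace, Bool.or_eq_true, Bool.and_eq_true, decide_eq_true_eq] at h
  simp only [char_le_iff, decide_eq_true_eq, Bool.and_eq_true, ite_eq_right_iff]
  intro h2; exfalso
  have ha : ('A':Char).toNat = 65 := by decide
  have hz : ('Z':Char).toNat = 90 := by decide
  omega

theorem toNat_lower_upper (c : Char) (h : PySem.Chars.isupper c = true) :
    (PySem.Chars.lowerChar c).toNat = c.toNat + 32 := by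
  unfold PySem.Chars.lowerChar
  rw [if_pos h]
  simp only [PySem.Chars.isupper, Bool.and_eq_true, decide_eq_true_eq, char_le_iff] at h
  have ha : ('A':Char).toNat = 65 := by decide
  have hz : ('Z':Char).toNat = 90 := by decide
  rw [Char.toNat_ofNat, if_pos]
  exact Or.inl (by omega)

theorem notspace_lower_of_alnum (c : Char) (h : PySem.Chars.isalnum c = true) :
    PySem.Chars.isspace (PySem.Chars.lowerChar c) = false := by
  simp only [PySem.Chars.isalnum, PySem.Chars.isalpha, Bool.or_eq_true] at h
  have ha : ('A':Char).toNat = 65 := by decide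
  have hz : ('Z':Char).toNat = 90 := by decide
  have hb : ('a':Char).toNat = 97 := by decide
  have hy : ('z':Char).toNat = 122 := by decide
  have h0 : ('0':Char).toNat = 48 := by decide
  have h9 : ('9':Char).toNat = 57 := by decide
  have key : 97 ≤ (PySem.Chars.lowerChar c).toNat ∧ (PySem.Chars.lowerChar c).toNat ≤ 122 ∨
      48 ≤ (PySem.Chars.lowerChar c).toNat ∧ (PySem.Chars.lowerChar c).toNat ≤ 57 := by
    rcases h with (h | h) | h
    · left; rw [toNat_lower_upper c h]
      simp only [PySem.Chars.isupper, Bool.and_eq_true, decide_eq_true_eq, char_le_iff, ha, hz] at h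
      omega
    all_goals {
      have hnu : PySem.Chars.isupper c = false := by
        simp only [PySem.Chars.islower, PySem.Chars.isdigit, Bool.and_eq_true, decide_eq_true_eq, char_le_iff, hb, hy, h0, h9] at h
        simp only [PySem.Chars.isupper, char_le_iff, ha, hz]
        simp; omega
      unfold PySem.Chars.lowerChar; rw [if_neg (by simp [hnu])]
      simp only [PySem.Chars.islower, PySem.Chars.isdigit, Bool.and_eq_true, decide_eq_true_eq, char_le_iff, hb, hy, h0, h9] at h
      omega }
  simp only [PySem.Chars.isspace, Bool.or_eq_false_iff, Bool.and_eq_false_iff]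
  simp only [decide_eq_false_iff_not]
  omega

theorem split_go_acc (cs : List Char) (cur : List Char) (acc : List (List Char)) :
    PySem.Chars.split₀.go cs cur acc = acc.reverse ++ PySem.Chars.split₀.go cs cur [] := by
  induction cs generalizing cur acc with
  | nil =>
    simp only [PySem.Chars.split₀.go]
    split_ifs <;> simp
  | cons c rest ih =>
    simp only [PySem.Chars.split₀.go]
    split_ifs with hs hc
    · exact ih _ _
    · rw [ih [] (cur.reverse :: acc), ih [] [cur.reverse]]; simp
    · exact ih _ _

theorem altGo_eq (cs : List Char) (buf : List Char) (out : List (List Char)) :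
    altGo cs buf out = out ++
      (PySem.Chars.split₀.go
        ((cs.filter (fun c => PySem.Chars.isalnum c || PySem.Chars.isspace c)).map PySem.Chars.lowerChar)
        buf []).filter (fun w => !(PySem.Set.contains pvStop w)) := by
  induction cs generalizing buf out with
  | nil =>
    by_cases hb : buf.isEmpty = true
    · simp [altGo, altFlush, PySem.Chars.split₀.go, hb]
    · by_cases hst : buf.reverse ∈ pvStop
      · simp [altGo, altFlush, PySem.Chars.split₀.go, hb, hst]
      · simp [altGo, altFlush, PySem.Chars.split₀.go, hb, hst]
  | cons c rest ih =>
    by_cases ha : PySem.Chars.isalnum c = true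
    · have hns := notspace_lower_of_alnum c ha
      rw [show altGo (c :: rest) buf out
            = altGo rest (PySem.Chars.lowerChar c :: buf) out by simp [altGo, ha]]
      rw [ih]
      simp [List.filter_cons, ha, PySem.Chars.split₀.go, hns]
    · by_cases hs : PySem.Chars.isspace c = true
      · have hl := lower_of_space c hs
        rw [show altGo (c :: rest) buf out
              = altGo rest [] (altFlush buf out) by simp [altGo, ha, hs]]
        rw [ih]
        simp only [List.filter_cons, Bool.or_eq_true, hs, or_true, if_pos, List.map_cons, hl]
        rw [show PySem.Chars.split₀.go (c :: (rest.filter (fun c => PySem.Chars.isalnum c || PySem.Chars.isspace c)).map PySem.Chars.lowerChar) buf []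
              = if buf.isEmpty then PySem.Chars.split₀.go ((rest.filter (fun c => PySem.Chars.isalnum c || PySem.Chars.isspace c)).map PySem.Chars.lowerChar) [] []
                else PySem.Chars.split₀.go ((rest.filter (fun c => PySem.Chars.isalnum c || PySem.Chars.isspace c)).map PySem.Chars.lowerChar) [] [buf.reverse] by
              simp [PySem.Chars.split₀.go, hs]]
        by_cases hb : buf.isEmpty = true
        · simp [altFlush, hb]
        · rw [split_go_acc _ [] [buf.reverse]]
          by_cases hst : buf.reverse ∈ pvStop
          · simp [altFlush, hb, hst]
          · simp [altFlush, hb, hst]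
      · rw [show altGo (c :: rest) buf out = altGo rest buf out by simp [altGo, ha, hs]]
        rw [ih]
        simp [List.filter_cons, ha, hs]

-- ===== VERDICT (by name: the statement is the Claim_ definition above) =====
theorem get_comparison_key_spec : Claim_equal_get_comparison_key := by
  intro text _
  unfold Spec_get_comparison_key get_comparison_key get_comparison_key_alt
  by_cases h : text = ""
  · simp [h]
  · simp only [h, ite_false, if_false]
    rw [PySem.Chars.split₀, altGo_eq]
    simp
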